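-- pv_equiv track=rewrite | github.com/pypi-data/pypi-mirror-307 | packages/sbeditor/sbeditor-0.0.4.tar.gz/sbeditor-0.0.4/sbeditor/sbeditor.py | digits_of
-- ===== SOURCE A (Python) =====
-- def digits_of(base: int):
--     i = 48
--     digits = ''
--     while len(digits) < base:
--         if 57 < i < 65:
--             i += 1
--             continue
--         if i > 90:
--             raise ValueError("0-9 and A-Z only support up to 43 digits!")
--         digits += chr(i)
--         i += 1
--     return digits
-- ===== SOURCE B (Python) =====
-- ALPHA = "0123456789ABCDEFGHIJKLMNOPQRSTUVWXYZ"
--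
-- def digits_of(base: int):
--     if base > len(ALPHA):
--         raise ValueError("0-9 and A-Z only support up to 43 digits!")
--     return ALPHA[:max(0, base)]
-- ===== Notes on version B (the rewrite author's own statement) =====
-- stated objective: simpler
-- what changed: Replaces the character-code while-loop that skips codes 58-64 with a single slice of a precomputed 36-character alphabet constant; the error check becomes one closed-form comparison base > 36.
import Mathlib
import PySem

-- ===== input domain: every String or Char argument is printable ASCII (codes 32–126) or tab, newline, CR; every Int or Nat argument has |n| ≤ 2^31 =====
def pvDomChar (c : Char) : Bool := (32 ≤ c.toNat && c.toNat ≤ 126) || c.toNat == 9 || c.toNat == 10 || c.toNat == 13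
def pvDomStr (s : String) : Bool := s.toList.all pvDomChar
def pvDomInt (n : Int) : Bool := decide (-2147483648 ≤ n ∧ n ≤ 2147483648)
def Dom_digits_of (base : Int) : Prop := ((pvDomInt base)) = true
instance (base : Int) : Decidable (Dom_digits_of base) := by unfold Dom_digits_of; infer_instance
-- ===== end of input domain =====

-- B replaces A's character-code while-loop (which skips codes 58-64) with one slice of a
-- precomputed 36-character alphabet constant; same ValueError condition (base > 36), stated closed-form.

-- ===== PORT A =====
-- A's while-loop: i runs from 48 upward, skipping 58..64, appending chr(i) while len(digits) < base;
-- at i > 90 the Python raises ValueError — Pre_ excludes those inputs, the port returns the partial string there.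
-- (Strings are carried as List Char; the wrapper digits_of packs the result with String.ofList.)
-- fuel = 44 ≥ number of loop iterations (i goes from 48 to at most 91, where Python raises)
def digitsOfLoop : Nat → Int → List Char → Int → List Char
  | 0, _, digits, _ => digits
  | fuel + 1, i, digits, base =>
    if (digits.length : Int) < base then
      if 57 < i ∧ i < 65 then digitsOfLoop fuel (i + 1) digits base
      else if i > 90 then digits  -- Python raises ValueError here; excluded by Pre_
      else digitsOfLoop fuel (i + 1) (digits ++ [Char.ofNat i.toNat]) base
    else digits

def digits_of (base : Int) : String := String.ofList (digitsOfLoop 44 48 [] base)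

-- ===== PORT B =====
def ALPHA : List Char := "0123456789ABCDEFGHIJKLMNOPQRSTUVWXYZ".toList

-- B: if base > 36 raise ValueError (excluded by Pre_; port returns "" there), else ALPHA[:max(0, base)].
def digits_of_alt (base : Int) : String :=
  if base > (ALPHA.length : Int) then ""  -- Python raises ValueError here; excluded by Pre_
  else String.ofList (ALPHA.take (max 0 base).toNat)

-- ===== PRECONDITION & SPEC =====
-- Pre_ excludes exactly the inputs where both Pythons raise ValueError: base > 36.
def Pre_digits_of (base : Int) : Prop := base ≤ 36
instance (base : Int) : Decidable (Pre_digits_of base) := by unfold Pre_digits_of; infer_instance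
def pvWitness_digits_of : Int := 16

def Spec_digits_of (base : Int) (out : String) : Prop := out = digits_of_alt base
instance (base : Int) (out : String) : Decidable (Spec_digits_of base out) := by unfold Spec_digits_of; infer_instance

-- ===== CLAIM (what is proved, stated in full; the proofs are below) =====
def Claim_equal_digits_of : Prop := ∀ (base : Int), Dom_digits_of base → Pre_digits_of base → Spec_digits_of base (digits_of base)

-- ===== LEMMAS AND PROOFS =====
theorem digits_of_nonpos (base : Int) (h : base ≤ 0) : digits_of base = digits_of_alt base := by
  unfold digits_of digits_of_alt digitsOfLoop
  have h1 : ¬ ((([] : List Char).length : Int) < base) := by simp; omega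
  have h2 : ¬ base > ((ALPHA : List Char).length : Int) := by
    have : (0:Int) ≤ (ALPHA.length : Int) := by positivity
    omega
  simp only [h1, h2, if_false]
  have : (max 0 base).toNat = 0 := by omega
  simp [this]

-- ===== VERDICT (by name: the statement is the Claim_ definition above) =====
theorem digits_of_spec : Claim_equal_digits_of := by
  intro base _ hpre
  unfold Spec_digits_of
  by_cases h0 : base ≤ 0
  · exact digits_of_nonpos base h0
  · unfold Pre_digits_of at hpre
    have h1 : 1 ≤ base := by omega
    interval_cases base <;>
      (unfold digits_of digits_of_alt
       rw [if_neg (by decide)]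
       exact congrArg String.ofList (by decide))
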